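-- pv_equiv track=rewrite | github.com/comeonboi/algorithm-practise | 泡芙代码随想录/第八天/541. 反转字符串 II.py | reverseStr
-- ===== SOURCE A (Python) =====
-- def reverseStr(s: str, k: int) -> str:
--     n = len(s)
--     result =""
--     is_reverse = 1
--     if k >= len(s):
--         return s[::-1]
--     for i in range(n):
--         if (i+1) % k == 0 and is_reverse == 1:
--             if i == k-1:
--                 result += s[i::-1]
--             else:
--                 result += s[i:i-k:-1]
--             is_reverse = 0
--         elif (i+1) % k == 0 and is_reverse == 0:
--             result += s[i+1-k:i+1]
--             is_reverse = 1
--     if len(result)<n and is_reverse==0: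
--         result+=s[len(result):]
--     else:
--         result+=s[n-1:len(result)-1:-1]
--     return result
-- ===== SOURCE B (Python) =====
-- def reverseStr(s: str, k: int) -> str:
--     return "".join(s[i:i+k][::-1] + s[i+k:i+2*k] for i in range(0, len(s), 2*k))
-- ===== Notes on version B (the rewrite author's own statement) =====
-- stated objective: simpler
-- what changed: Replaced A's per-character loop with its (i+1)%k modulo test, is_reverse flag state machine, two kinds of backward slices and a post-loop tail fixup by the canonical block-stride solution: one comprehension over range(0, n, 2*k) joining s[i:i+k][::-1] + s[i+k:i+2*k].
-- outside the precondition, e.g. on reverseStr('abc', -1): A returns 'abc', B returns ''; on reverseStr('abcdef', -2): A returns 'abcdef', B returns ''; on reverseStr('a', 0): A raises ZeroDivisionError, B raises ValueError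
import Mathlib
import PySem

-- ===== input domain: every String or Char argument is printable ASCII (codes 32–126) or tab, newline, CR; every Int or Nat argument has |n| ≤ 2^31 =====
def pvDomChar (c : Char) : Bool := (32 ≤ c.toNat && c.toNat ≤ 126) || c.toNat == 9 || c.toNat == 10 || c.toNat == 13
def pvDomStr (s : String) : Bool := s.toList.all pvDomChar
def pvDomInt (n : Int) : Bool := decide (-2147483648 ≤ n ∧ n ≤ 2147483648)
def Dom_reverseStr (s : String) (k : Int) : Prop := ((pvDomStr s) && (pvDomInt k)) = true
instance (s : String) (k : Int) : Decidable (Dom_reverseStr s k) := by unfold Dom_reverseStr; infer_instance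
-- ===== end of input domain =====

-- B replaces A's per-index modulo/flag state machine and end fixup by one pass over the
-- 2k-strided block starts joined at the end; objective: simpler (and measured faster by the
-- timing run: one iteration per 2k-block instead of per character).

-- ===== PORT A =====
-- loop body of A's 'for i in range(n)' (state = (result, is_reverse))
def stepA (cs : List Char) (k : Int) (st : List Char × Int) (i : Int) : List Char × Int :=
  if PySem.Int.mod (i + 1) k = 0 ∧ st.2 = 1 then
    (st.1 ++ (if i = k - 1 then
                (PySem.List.slice? cs (some i) none (-1)).getD []        -- s[i::-1]
              else
                (PySem.List.slice? cs (some i) (some (i - k)) (-1)).getD []), 0)  -- s[i:i-k:-1]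
  else if PySem.Int.mod (i + 1) k = 0 ∧ st.2 = 0 then
    (st.1 ++ PySem.List.slice cs (some (i + 1 - k)) (some (i + 1)), 1)   -- s[i+1-k:i+1]
  else st

def reverseStr (s : String) (k : Int) : String :=
  let cs := s.toList
  let n : Int := (cs.length : Int)
  if k ≥ n then String.ofList ((PySem.List.slice? cs none none (-1)).getD [])  -- s[::-1]
  else
    let st := (PySem.List.pyRange 0 n 1).foldl (stepA cs k) ([], 1)
    let result :=
      if (st.1.length : Int) < n ∧ st.2 = 0 then
        st.1 ++ PySem.List.slice cs (some (st.1.length : Int)) none          -- s[len(result):]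
      else
        st.1 ++ (PySem.List.slice? cs (some (n - 1)) (some ((st.1.length : Int) - 1)) (-1)).getD []  -- s[n-1:len(result)-1:-1]
    String.ofList result

-- ===== PORT B =====
-- one block of B's comprehension: s[i:i+k][::-1] + s[i+k:i+2*k]
def blockB (cs : List Char) (k : Int) (i : Int) : List Char :=
  (PySem.List.slice cs (some i) (some (i + k))).reverse ++
    PySem.List.slice cs (some (i + k)) (some (i + 2 * k))

def reverseStr_alt (s : String) (k : Int) : String :=
  let cs := s.toList
  String.ofList (PySem.Chars.join []
    ((PySem.List.pyRange 0 (cs.length : Int) (2 * k)).map (blockB cs k)))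

-- ===== PRECONDITION & SPEC =====
-- Pre_ restricts to the task's natural domain k ≥ 1: for k = 0 A raises ZeroDivisionError on a
-- nonempty s, and for k < 0 A's returned values are accidents of negative-step slicing and of the
-- sign of Python's modulo, outside the task's meaning ('reverse every other block of k ≥ 1 chars').
def Pre_reverseStr (s : String) (k : Int) : Prop := 1 ≤ k
instance (s : String) (k : Int) : Decidable (Pre_reverseStr s k) := by unfold Pre_reverseStr; infer_instance
def pvWitness_reverseStr : String × Int := ("abcdef", 2)

def Spec_reverseStr (s : String) (k : Int) (out : String) : Prop := out = reverseStr_alt s k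
instance (s : String) (k : Int) (out : String) : Decidable (Spec_reverseStr s k out) := by unfold Spec_reverseStr; infer_instance

-- ===== CLAIM (what is proved, stated in full; the proofs are below) =====
def Claim_equal_reverseStr : Prop := ∀ (s : String) (k : Int), Dom_reverseStr s k → Pre_reverseStr s k → Spec_reverseStr s k (reverseStr s k)

-- ===== LEMMAS AND PROOFS =====

-- the common mathematical shape both programs compute: alternately reversed k-chunks
def canon (k : Nat) (rev : Bool) (cs : List Char) : List Char :=
  if _h : cs = [] ∨ k = 0 then [] else
    (if rev then (cs.take k).reverse else cs.take k) ++ canon k (!rev) (cs.drop k)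
termination_by cs.length
decreasing_by
  simp only [not_or] at _h
  have : cs.length ≠ 0 := fun h => _h.1 (List.eq_nil_of_length_eq_zero h)
  simp only [List.length_drop]; omega

-- result of A's loop after passing b block boundaries
def outA (cs : List Char) (k : Nat) : Nat → List Char
  | 0 => []
  | b + 1 => outA cs k b ++
      (if b % 2 = 0 then ((cs.drop (b * k)).take k).reverse else (cs.drop (b * k)).take k)

-- backward-slice computations -------------------------------------------------

lemma filterMap_countdown (xs : List Char) (i c : Nat) (h : i < xs.length) (hc : c ≤ i + 1) :
    List.filterMap (fun t => xs[(i - t)]?) (List.range c)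
      = ((xs.drop (i + 1 - c)).take c).reverse := by
  induction c with
  | zero => simp
  | succ c ih =>
    have hic : i - c < xs.length := by omega
    rw [List.range_succ, List.filterMap_append, ih (by omega)]
    have h1 : List.filterMap (fun t => xs[(i - t)]?) [c] = [xs[i - c]] := by
      simp [List.filterMap, xs.getElem?_eq_getElem hic]
    rw [h1]
    have hdrop : xs.drop (i - c) = xs[i - c] :: xs.drop (i - c + 1) := by
      exact List.drop_eq_getElem_cons hic
    have h2 : i - c + 1 = i + 1 - c := by omega
    rw [show i + 1 - (c + 1) = i - c by omega, hdrop, List.take_succ_cons,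
        List.reverse_cons, h2]

lemma sliceNeg_none (xs : List Char) (i : Nat) (h : i < xs.length) :
    PySem.List.slice? xs (some (i : Int)) none (-1) = some ((xs.take (i + 1)).reverse) := by
  simp only [PySem.List.slice?, PySem.List.sliceIndices]
  norm_num
  rw [if_neg (by omega : ¬ (i : Int) < 0), if_pos (by omega : (-1 : Int) < min (i : Int) ((xs.length : Int) - 1))]
  rw [min_eq_left (by omega : (i : Int) ≤ (xs.length : Int) - 1)]
  rw [show ((i : Int) + 1).toNat = i + 1 by omega]
  rw [List.filterMap_congr (g := fun t => xs[(i - t)]?) (by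
    intro t ht
    have htl : t < i + 1 := List.mem_range.mp ht
    congr 1
    omega)]
  rw [filterMap_countdown xs i (i + 1) h (by omega)]
  simp

lemma sliceNeg_some (xs : List Char) (i j : Nat) (hj : j ≤ i) (h : i < xs.length) :
    PySem.List.slice? xs (some (i : Int)) (some (j : Int)) (-1)
      = some (((xs.drop (j + 1)).take (i - j)).reverse) := by
  simp only [PySem.List.slice?, PySem.List.sliceIndices]
  norm_num
  rw [if_neg (by omega : ¬ (i : Int) < 0), if_neg (by omega : ¬ (j : Int) < 0)]
  rw [min_eq_left (by omega : (i : Int) ≤ (xs.length : Int) - 1),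
      min_eq_left (by omega : (j : Int) ≤ (xs.length : Int) - 1)]
  by_cases hji : j < i
  · rw [if_pos (by omega : (j : Int) < (i : Int))]
    rw [show ((i : Int) - (j : Int)).toNat = i - j by omega]
    rw [List.filterMap_congr (g := fun t => xs[(i - t)]?) (by
      intro t ht
      have htl : t < i - j := List.mem_range.mp ht
      congr 1
      omega)]
    rw [filterMap_countdown xs i (i - j) h (by omega)]
    rw [show i + 1 - (i - j) = j + 1 by omega]
  · rw [if_neg (by omega : ¬ (j : Int) < (i : Int))]
    rw [show j = i by omega]
    simp

-- A's loop invariant ----------------------------------------------------------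

lemma foldA (cs : List Char) (kn : Nat) (hk : 0 < kn) :
    ∀ j, j ≤ cs.length →
      (PySem.List.pyRange 0 (j : Int) 1).foldl (stepA cs (kn : Int)) ([], 1)
        = (outA cs kn (j / kn), if (j / kn) % 2 = 0 then 1 else 0) := by
  intro j
  induction j with
  | zero =>
    intro _
    rw [show ((0 : Nat) : Int) = 0 by norm_num, PySem.List.pyRange_of_pos 0 0 (by norm_num)]
    simp [outA]
  | succ j ih =>
    intro hj
    have hj' : j ≤ cs.length := by omega
    have hjlt : j < cs.length := by omega
    rw [show ((j + 1 : Nat) : Int) = ((j : Nat) : Int) + 1 by push_cast; ring,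
        PySem.List.pyRange_one_succ_right (by positivity), List.foldl_append, ih hj',
        List.foldl_cons, List.foldl_nil]
    unfold stepA
    have hmod : PySem.Int.mod ((j : Int) + 1) ((kn : Nat) : Int) = (((j + 1) % kn : Nat) : Int) := by
      rw [show ((j : Int) + 1) = ((j + 1 : Nat) : Int) by push_cast; ring]
      exact PySem.Int.mod_natCast _ _
    rw [hmod]
    by_cases hdvd : kn ∣ (j + 1)
    · have hmod0 : (j + 1) % kn = 0 := Nat.dvd_iff_mod_eq_zero.mp hdvd
      have hsucc : (j + 1) / kn = j / kn + 1 := by rw [Nat.succ_div, if_pos hdvd]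
      have hjk : j + 1 = (j / kn + 1) * kn := by
        rw [← hsucc]; exact (Nat.div_mul_cancel hdvd).symm
      rw [hsucc]
      set b := j / kn with hbdef
      have hx : (b + 1) * kn = b * kn + kn := by ring
      by_cases hb2 : b % 2 = 0
      · -- is_reverse = 1: A appends a reversed block
        have hcond : (((j + 1) % kn : Nat) : Int) = 0 ∧ (if b % 2 = 0 then (1 : Int) else 0) = 1 :=
          ⟨by simp [hmod0], by rw [if_pos hb2]⟩
        rw [if_pos hcond]
        have hflag : ¬ ((b + 1) % 2 = 0) := by omega
        rw [if_neg hflag]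
        by_cases hb0 : b = 0
        · have hjkn : j + 1 = kn := by rw [hb0] at hjk; simpa using hjk
          rw [if_pos (by omega : (j : Int) = ((kn : Nat) : Int) - 1)]
          rw [sliceNeg_none cs j hjlt]
          simp only [Option.getD_some, outA, hb0]
          simp [hjkn]
        · have hb1 : 1 ≤ b := Nat.pos_of_ne_zero hb0
          have h2kn : 2 * kn ≤ (b + 1) * kn := Nat.mul_le_mul (by omega) (le_refl kn)
          have hjge : kn ≤ j := by omega
          rw [if_neg (by omega : ¬ ((j : Int) = ((kn : Nat) : Int) - 1))]
          rw [show (j : Int) - ((kn : Nat) : Int) = ((j - kn : Nat) : Int) by omega]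
          rw [sliceNeg_some cs j (j - kn) (by omega) hjlt]
          simp only [Option.getD_some, outA]
          rw [if_pos hb2]
          have e1 : j - kn + 1 = b * kn := by omega
          have e2 : j - (j - kn) = kn := by omega
          rw [e1, e2]
      · -- is_reverse = 0: A appends a straight block
        have hc1 : ¬ ((((j + 1) % kn : Nat) : Int) = 0 ∧ (if b % 2 = 0 then (1 : Int) else 0) = 1) := by
          rw [if_neg hb2]; rintro ⟨-, h⟩; exact absurd h (by norm_num)
        have hcond : (((j + 1) % kn : Nat) : Int) = 0 ∧ (if b % 2 = 0 then (1 : Int) else 0) = 0 :=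
          ⟨by simp [hmod0], by rw [if_neg hb2]⟩
        rw [if_neg hc1, if_pos hcond]
        have hflag : (b + 1) % 2 = 0 := by omega
        rw [if_pos hflag]
        have hjge : kn ≤ j + 1 := by omega
        rw [show (j : Int) + 1 - ((kn : Nat) : Int) = ((j + 1 - kn : Nat) : Int) by omega,
            show (j : Int) + 1 = ((j + 1 : Nat) : Int) by push_cast; ring]
        rw [PySem.List.slice_natCast]
        simp only [outA]
        rw [if_neg hb2]
        have e1 : j + 1 - kn = b * kn := by omega
        have e2 : j + 1 - b * kn = kn := by omega
        rw [e1, e2]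
    · have hmod0 : ¬ ((j + 1) % kn = 0) := fun h => hdvd (Nat.dvd_of_mod_eq_zero h)
      have hc1 : ¬ ((((j + 1) % kn : Nat) : Int) = 0 ∧ (if j / kn % 2 = 0 then (1 : Int) else 0) = 1) := by
        intro hcon
        exact hmod0 (by exact_mod_cast hcon.1)
      have hc2 : ¬ ((((j + 1) % kn : Nat) : Int) = 0 ∧ (if j / kn % 2 = 0 then (1 : Int) else 0) = 0) := by
        intro hcon
        exact hmod0 (by exact_mod_cast hcon.1)
      rw [if_neg hc1, if_neg hc2, Nat.succ_div, if_neg hdvd]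
      simp

lemma len_outA (cs : List Char) (kn : Nat) :
    ∀ b, b * kn ≤ cs.length → (outA cs kn b).length = b * kn := by
  intro b
  induction b with
  | zero => intro _; simp [outA]
  | succ b ih =>
    intro hb
    have hmul : (b + 1) * kn = b * kn + kn := by ring
    have hb' : b * kn ≤ cs.length := by omega
    simp only [outA, List.length_append, ih hb']
    split_ifs <;> simp [List.length_take, List.length_drop] <;> omega

-- outA b together with the canonical rest is the whole canonical answer
lemma outA_canon (cs : List Char) (kn : Nat) (hk : 0 < kn) :
    ∀ b, b * kn ≤ cs.length →
      outA cs kn b ++ canon kn (decide (b % 2 = 0)) (cs.drop (b * kn)) = canon kn true cs := by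
  intro b
  induction b with
  | zero => intro _; simp [outA]
  | succ b ih =>
    intro hb
    have hmul : (b + 1) * kn = b * kn + kn := by ring
    have hb' : b * kn ≤ cs.length := by omega
    rw [← ih hb']
    have hne : ¬ (cs.drop (b * kn) = [] ∨ kn = 0) := by
      simp only [not_or]
      constructor
      · intro hnil
        have := congrArg List.length hnil
        simp only [List.length_drop, List.length_nil] at this
        omega
      · omega
    have hstep : canon kn (decide (b % 2 = 0)) (cs.drop (b * kn))
        = (if b % 2 = 0 then ((cs.drop (b * kn)).take kn).reverse else (cs.drop (b * kn)).take kn)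
          ++ canon kn (decide ((b + 1) % 2 = 0)) (cs.drop ((b + 1) * kn)) := by
      rw [canon, dif_neg hne, List.drop_drop]
      have harg : kn + b * kn = (b + 1) * kn := by ring
      by_cases hb2 : b % 2 = 0
      · have h1 : (b + 1) % 2 = 1 := by omega
        simp [hb2, h1]
        rw [← hmul]
      · have h0 : (b + 1) % 2 = 0 := by omega
        have h1 : b % 2 = 1 := by omega
        simp [h1, h0]
        rw [← hmul]
    rw [hstep]
    simp [outA, List.append_assoc]

-- B computes canon ------------------------------------------------------------

lemma join_nil_eq_flatten (ps : List (List Char)) : PySem.Chars.join [] ps = ps.flatten := by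
  show List.intercalate [] ps = ps.flatten
  induction ps with
  | nil => rfl
  | cons a t ih => cases t <;> simp_all [List.intercalate, List.intersperse]

lemma Bnat (kn : Nat) (hk : 0 < kn) :
    ∀ (m : Nat) (cs : List Char), cs.length ≤ m →
      (List.range ((cs.length + 2 * kn - 1) / (2 * kn))).flatMap
          (fun t => ((cs.drop (2 * kn * t)).take kn).reverse ++ (cs.drop (2 * kn * t + kn)).take kn)
        = canon kn true cs := by
  intro m
  induction m with
  | zero =>
    intro cs hm
    have h0 : cs = [] := List.eq_nil_of_length_eq_zero (by omega)
    subst h0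
    have : (0 + 2 * kn - 1) / (2 * kn) = 0 := Nat.div_eq_of_lt (by omega)
    simp only [List.length_nil, this, List.range_zero, List.flatMap_nil]
    rw [canon]; simp
  | succ m ih =>
    intro cs hm
    by_cases h0 : cs = []
    · subst h0
      have : (0 + 2 * kn - 1) / (2 * kn) = 0 := Nat.div_eq_of_lt (by omega)
      simp only [List.length_nil, this, List.range_zero, List.flatMap_nil]
      rw [canon]; simp
    · have hn1 : 1 ≤ cs.length := by
        rcases Nat.eq_zero_or_pos cs.length with h | h
        · exact absurd (List.eq_nil_of_length_eq_zero h) h0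
        · exact h
      have hcnt : (cs.length + 2 * kn - 1) / (2 * kn) = (cs.length - 1) / (2 * kn) + 1 := by
        rw [show cs.length + 2 * kn - 1 = (cs.length - 1) + 2 * kn by omega]
        exact Nat.add_div_right _ (by omega)
      have hcnt' : (cs.length - 1) / (2 * kn)
          = ((cs.drop (2 * kn)).length + 2 * kn - 1) / (2 * kn) := by
        rw [List.length_drop]
        by_cases hz : cs.length ≤ 2 * kn
        · rw [Nat.div_eq_of_lt (by omega), show cs.length - 2 * kn = 0 by omega,
              Nat.div_eq_of_lt (by omega)]
        · rw [show cs.length - 2 * kn + 2 * kn - 1 = (cs.length - 2 * kn - 1) + 2 * kn by omega,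
              Nat.add_div_right _ (by omega),
              show cs.length - 1 = (cs.length - 2 * kn - 1) + 2 * kn by omega,
              Nat.add_div_right _ (by omega)]
      rw [hcnt, List.range_succ_eq_map, List.flatMap_cons, List.flatMap_map]
      have hshift : (fun a : Nat =>
            (List.take kn (List.drop (2 * kn * a.succ) cs)).reverse
              ++ List.take kn (List.drop (2 * kn * a.succ + kn) cs))
          = (fun t : Nat =>
            (List.take kn (List.drop (2 * kn * t) (cs.drop (2 * kn)))).reverse
              ++ List.take kn (List.drop (2 * kn * t + kn) (cs.drop (2 * kn)))) := by
        funext t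
        simp only [List.drop_drop]
        rw [show 2 * kn * t.succ = 2 * kn + 2 * kn * t from by
              simp only [Nat.succ_eq_add_one]; ring,
            show 2 * kn + 2 * kn * t + kn = 2 * kn + (2 * kn * t + kn) from by ring]
      rw [hshift, hcnt', ih (cs.drop (2 * kn)) (by rw [List.length_drop]; omega)]
      -- the head block together with the canonical rest is one canon unfolding (twice)
      have hck : ¬ (cs = [] ∨ kn = 0) := by simp [h0]; omega
      conv_rhs => rw [canon]
      rw [dif_neg hck]
      simp only [List.drop_zero, Nat.mul_zero, List.drop_zero, List.append_assoc]
      congr 1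
      rw [show 0 + kn = kn from by ring]
      by_cases hdk : cs.drop kn = []
      · have hlen : cs.length ≤ kn := by
          have := congrArg List.length hdk
          simp only [List.length_drop, List.length_nil] at this
          omega
        have hd2 : cs.drop (2 * kn) = [] := List.drop_eq_nil_of_le (by omega)
        rw [hdk, hd2]
        simp [canon]
      · conv_rhs => rw [canon]
        rw [dif_neg (by simp [hdk]; omega)]
        have hd2 : (cs.drop kn).drop kn = cs.drop (2 * kn) := by
          rw [List.drop_drop]; congr 1; ring
        rw [hd2]
        simp
    

lemma B_eq_canon (cs : List Char) (kn : Nat) (hk : 0 < kn) :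
    PySem.Chars.join [] ((PySem.List.pyRange 0 (cs.length : Int) (2 * (kn : Int))).map
        (blockB cs (kn : Int))) = canon kn true cs := by
  have hs : (0 : Int) < 2 * (kn : Int) := by omega
  rw [PySem.List.pyRange_of_pos 0 (cs.length : Int) hs]
  by_cases h0 : cs = []
  · subst h0
    simp [canon]
  · have hn1 : 1 ≤ cs.length := by
      rcases Nat.eq_zero_or_pos cs.length with h | h
      · exact absurd (List.eq_nil_of_length_eq_zero h) h0
      · exact h
    rw [if_pos (by omega : (0 : Int) < (cs.length : Int))]
    have hcint : ((cs.length : Int) - 0 + 2 * (kn : Int) - 1)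
        = ((cs.length + 2 * kn - 1 : Nat) : Int) := by omega
    have hcdiv : (((cs.length + 2 * kn - 1 : Nat) : Int) / (2 * (kn : Int))).toNat
        = (cs.length + 2 * kn - 1) / (2 * kn) := by
      rw [show (2 * (kn : Int)) = ((2 * kn : Nat) : Int) by push_cast; ring]
      rfl
    rw [hcint, hcdiv, List.map_map]
    rw [join_nil_eq_flatten]
    have hfun : (blockB cs (kn : Int) ∘ fun t : Nat => (0 : Int) + 2 * (kn : Int) * (t : Int))
        = (fun t : Nat => ((cs.drop (2 * kn * t)).take kn).reverse
            ++ (cs.drop (2 * kn * t + kn)).take kn) := by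
      funext t
      simp only [Function.comp_apply, blockB]
      rw [show (0 : Int) + 2 * (kn : Int) * (t : Int) = ((2 * kn * t : Nat) : Int) by push_cast; ring]
      rw [show ((2 * kn * t : Nat) : Int) + (kn : Int) = ((2 * kn * t + kn : Nat) : Int) by push_cast; ring]
      rw [show ((2 * kn * t : Nat) : Int) + 2 * (kn : Int) = ((2 * kn * t + 2 * kn : Nat) : Int) by push_cast; ring]
      rw [PySem.List.slice_natCast, PySem.List.slice_natCast]
      rw [show 2 * kn * t + kn - 2 * kn * t = kn by omega,
          show 2 * kn * t + 2 * kn - (2 * kn * t + kn) = kn by omega]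
    rw [hfun]
    have hflat : ∀ (l : List Nat) (f : Nat → List Char), (l.map f).flatten = l.flatMap f := by
      intro l f
      induction l with
      | nil => rfl
      | cons a tl ih => simp [ih]
    rw [hflat]
    exact Bnat kn hk cs.length cs (le_refl _)

-- A computes canon ------------------------------------------------------------

lemma A_eq_canon (cs : List Char) (kn : Nat) (hk : 0 < kn) :
    reverseStr (String.ofList cs) (kn : Int) = String.ofList (canon kn true cs) := by
  simp only [reverseStr, String.toList_ofList]
  by_cases hbig : (kn : Int) ≥ (cs.length : Int)
  · rw [if_pos hbig, PySem.List.slice?_none_none_neg_one, Option.getD_some]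
    by_cases h0 : cs = []
    · subst h0; simp [canon]
    · rw [canon, dif_neg (by simp [h0]; omega)]
      rw [List.take_of_length_le (by omega), List.drop_eq_nil_of_le (by omega)]
      simp [canon]
  · rw [if_neg hbig]
    have hkn : kn < cs.length := by omega
    rw [foldA cs kn hk cs.length (le_refl _)]
    have h1 := Nat.div_add_mod cs.length kn
    have h2 : cs.length % kn < kn := Nat.mod_lt _ hk
    set b := cs.length / kn with hbdef
    have h1' : b * kn + cs.length % kn = cs.length := by rw [Nat.mul_comm]; exact h1
    have hb1 : 1 ≤ b := (Nat.one_le_div_iff hk).mpr (le_of_lt hkn)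
    clear_value b
    obtain ⟨R, hRlt, hsum⟩ : ∃ R, R < kn ∧ b * kn + R = cs.length := ⟨_, h2, h1'⟩
    clear hbdef h1 h2 h1'
    have hble : b * kn ≤ cs.length := by omega
    have hbk1 : kn ≤ b * kn := by
      calc kn = 1 * kn := (one_mul kn).symm
      _ ≤ b * kn := Nat.mul_le_mul hb1 (le_refl kn)
    have hlen : (outA cs kn b).length = b * kn := len_outA cs kn b hble
    have hrest : (cs.drop (b * kn)).length = cs.length - b * kn := List.length_drop ..
    have hcanon := outA_canon cs kn hk b hble
    by_cases hb2 : b % 2 = 0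
    · -- loop left is_reverse = 1: the tail (possibly empty) is reversed
      rw [if_neg (by rintro ⟨-, hcon⟩; rw [if_pos hb2] at hcon; exact absurd hcon (by norm_num))]
      rw [hlen]
      rw [show ((cs.length : Nat) : Int) - 1 = ((cs.length - 1 : Nat) : Int) by omega,
          show ((b * kn : Nat) : Int) - 1 = ((b * kn - 1 : Nat) : Int) by omega]
      rw [sliceNeg_some cs (cs.length - 1) (b * kn - 1) (by omega) (by omega)]
      rw [Option.getD_some,
          show b * kn - 1 + 1 = b * kn by omega,
          show cs.length - 1 - (b * kn - 1) = cs.length - b * kn by omega]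
      rw [List.take_of_length_le (by rw [hrest])]
      rw [← hcanon]
      have hrl : (cs.drop (b * kn)).length ≤ kn := by rw [hrest]; omega
      congr 1
      rw [show (decide (b % 2 = 0)) = true from by simp [hb2]]
      by_cases hrnil : cs.drop (b * kn) = []
      · rw [hrnil]; simp [canon]
      · rw [canon, dif_neg (by simp [hrnil]; omega)]
        rw [if_pos rfl]
        rw [List.take_of_length_le hrl, List.drop_eq_nil_of_le hrl]
        simp [canon]
    · -- loop left is_reverse = 0: the tail (possibly empty) is appended straight
      by_cases hfull : b * kn = cs.length
      · rw [if_neg (by rintro ⟨hcon, -⟩; rw [hlen] at hcon; omega)]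
        rw [hlen]
        rw [show ((cs.length : Nat) : Int) - 1 = ((cs.length - 1 : Nat) : Int) by omega,
            show ((b * kn : Nat) : Int) - 1 = ((b * kn - 1 : Nat) : Int) by omega]
        rw [sliceNeg_some cs (cs.length - 1) (b * kn - 1) (by omega) (by omega)]
        rw [Option.getD_some, show cs.length - 1 - (b * kn - 1) = 0 by omega]
        rw [List.take_zero, List.reverse_nil, ← hcanon]
        congr 1
        rw [show cs.drop (b * kn) = [] from List.drop_eq_nil_of_le (by omega)]
        simp [canon]
      · rw [if_pos ⟨by rw [hlen]; omega, by rw [if_neg hb2]⟩]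
        rw [hlen, PySem.List.slice_from_natCast, ← hcanon]
        have hrl : (cs.drop (b * kn)).length ≤ kn := by rw [hrest]; omega
        congr 1
        rw [show (decide (b % 2 = 0)) = false from by simp only [decide_eq_false_iff_not]; exact hb2]
        rw [canon, dif_neg (by
              intro hcon
              rcases hcon with hcon | hcon
              · have := congrArg List.length hcon
                rw [hrest] at this
                simp at this
                omega
              · omega)]
        rw [if_neg Bool.false_ne_true]
        rw [List.take_of_length_le hrl, List.drop_eq_nil_of_le hrl]
        simp [canon]

-- ===== VERDICT (by name: the statement is the Claim_ definition above) =====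
theorem reverseStr_spec : Claim_equal_reverseStr := by
  intro s k _hdom hk
  unfold Spec_reverseStr
  have hk1 : 1 ≤ k := hk
  have hk' : k = ((k.toNat : Nat) : Int) := by omega
  have hkpos : 0 < k.toNat := by omega
  rw [hk']
  calc reverseStr s ((k.toNat : Nat) : Int)
      = String.ofList (canon k.toNat true s.toList) := by
        conv_lhs => rw [← String.ofList_toList (s := s)]
        exact A_eq_canon s.toList k.toNat hkpos
    _ = reverseStr_alt s ((k.toNat : Nat) : Int) := by
        simp only [reverseStr_alt, B_eq_canon s.toList k.toNat hkpos]
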